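-- pv_equiv track=rewrite | github.com/Khushalsarode/IBM-CodeKnack | transformations.py | oddeventransform
-- ===== SOURCE A (Python) =====
-- def oddeventransform(arr, transform):
--     for i in range(transform):
--         for i in range(len(arr)):
--             if arr[i]%2==0:
--                 arr[i]= arr[i]-3
--             else:
--                 arr[i]= arr[i]+3
--     return arr
-- ===== SOURCE B (Python) =====
-- def oddeventransform(arr, transform):
--     # Two consecutive passes cancel (parity flips each pass), so only
--     # transform's parity matters; one pass (or none) in place of transform passes.
--     if transform > 0 and transform % 2 == 1:
--         arr[:] = [x - 3 if x % 2 == 0 else x + 3 for x in arr]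
--     return arr
-- ===== Notes on version B (the rewrite author's own statement) =====
-- stated objective: faster
-- what changed: Replaces transform*n element updates by the observation that the per-element transform is an involution, so the result depends only on transform's parity: zero or one map pass.
import Mathlib
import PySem

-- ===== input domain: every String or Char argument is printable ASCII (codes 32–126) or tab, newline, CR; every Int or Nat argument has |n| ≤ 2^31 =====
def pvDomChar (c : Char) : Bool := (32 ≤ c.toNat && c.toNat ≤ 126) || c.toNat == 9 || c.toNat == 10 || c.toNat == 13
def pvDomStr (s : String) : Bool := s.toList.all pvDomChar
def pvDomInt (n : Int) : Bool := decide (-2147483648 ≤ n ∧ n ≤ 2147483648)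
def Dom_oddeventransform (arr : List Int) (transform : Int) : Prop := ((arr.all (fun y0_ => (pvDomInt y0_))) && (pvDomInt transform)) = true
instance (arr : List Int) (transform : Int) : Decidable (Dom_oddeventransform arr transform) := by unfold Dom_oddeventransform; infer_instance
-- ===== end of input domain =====

-- B is faster: the per-element ±3 transform is an involution, so only transform's
-- parity matters (zero or one map pass instead of transform passes). A mutates arr in
-- place (B mirrors this via arr[:]); the equivalence proved here is about the return value.

-- ===== PORT A =====
def oddeventransform (arr : List Int) (transform : Int) : List Int :=
  (PySem.List.pyRange 0 transform 1).foldl (fun a _ =>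
    (PySem.List.pyRange 0 (PySem.List.len a) 1).foldl (fun a i =>
      if PySem.Int.mod (PySem.List.pyGetD a i 0) 2 = 0 then
        PySem.List.pySetD a i (PySem.List.pyGetD a i 0 - 3)
      else
        PySem.List.pySetD a i (PySem.List.pyGetD a i 0 + 3)) a) arr

-- ===== PORT B =====
def pvFlip (x : Int) : Int := if PySem.Int.mod x 2 = 0 then x - 3 else x + 3

def oddeventransform_alt (arr : List Int) (transform : Int) : List Int :=
  if transform > 0 ∧ PySem.Int.mod transform 2 = 1 then arr.map pvFlip else arr

-- ===== PRECONDITION & SPEC =====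
def Spec_oddeventransform (arr : List Int) (transform : Int) (out : List Int) : Prop := out = oddeventransform_alt arr transform
instance (arr : List Int) (transform : Int) (out : List Int) : Decidable (Spec_oddeventransform arr transform out) := by unfold Spec_oddeventransform; infer_instance

-- ===== CLAIM (what is proved, stated in full; the proofs are below) =====
def Claim_equal_oddeventransform : Prop := ∀ (arr : List Int) (transform : Int), Dom_oddeventransform arr transform → Spec_oddeventransform arr transform (oddeventransform arr transform)

-- ===== LEMMAS AND PROOFS =====

-- A's inner body as a function of the state
def pvUpd (a : List Int) (i : Int) : List Int :=
  if PySem.Int.mod (PySem.List.pyGetD a i 0) 2 = 0 then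
    PySem.List.pySetD a i (PySem.List.pyGetD a i 0 - 3)
  else
    PySem.List.pySetD a i (PySem.List.pyGetD a i 0 + 3)

theorem pvUpd_at (pre : List Int) (x : Int) (suf : List Int) :
    pvUpd (pre ++ x :: suf) (pre.length : Int) = pre ++ pvFlip x :: suf := by
  have hget : PySem.List.pyGetD (pre ++ x :: suf) (pre.length : Int) 0 = x := by
    rw [PySem.List.pyGetD_natCast]
    simp
  unfold pvUpd pvFlip
  rw [hget, PySem.List.pySetD_natCast, PySem.List.pySetD_natCast]
  split_ifs with h <;> simp

-- one inner pass, with the already-processed prefix made explicit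
theorem pv_inner_go (suf : List Int) : ∀ (pre : List Int),
    (PySem.List.pyRange (pre.length : Int) ((pre ++ suf).length : Int) 1).foldl pvUpd (pre ++ suf)
      = pre ++ suf.map pvFlip := by
  induction suf with
  | nil => intro pre; simp [PySem.List.pyRange_one_eq_nil]
  | cons x xs ih =>
    intro pre
    have hlt : (pre.length : Int) < ((pre ++ x :: xs).length : Int) := by
      simp only [List.length_append, List.length_cons]; push_cast; omega
    rw [PySem.List.pyRange_one_cons hlt, List.foldl_cons, pvUpd_at]
    have := ih (pre ++ [pvFlip x])
    simpa using this

theorem pv_inner (a : List Int) :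
    (PySem.List.pyRange 0 (PySem.List.len a) 1).foldl pvUpd a = a.map pvFlip := by
  have := pv_inner_go a []
  simpa [PySem.List.len] using this

theorem pvFlip_flip (x : Int) : pvFlip (pvFlip x) = x := by
  simp only [pvFlip, PySem.Int.mod_eq_emod_of_pos (by norm_num : (0:Int) < 2)]
  split_ifs with h1 h2 h3 <;> omega

theorem pv_map_map (a : List Int) : (a.map pvFlip).map pvFlip = a := by
  simp [List.map_map, Function.comp_def, pvFlip_flip]

-- outer loop: a constant-body foldl over a range is an iterate
theorem pv_outer (n : Nat) : ∀ (s : Int) (a : List Int),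
    (PySem.List.pyRange s (s + n) 1).foldl (fun a _ => a.map pvFlip) a
      = (fun b => b.map pvFlip)^[n] a := by
  induction n with
  | zero => intro s a; simp [PySem.List.pyRange_one_eq_nil]
  | succ k ih =>
    intro s a
    rw [PySem.List.pyRange_one_cons (by omega), List.foldl_cons]
    have : s + (↑(k + 1) : Int) = (s + 1) + k := by push_cast; ring
    rw [this, ih (s + 1), Function.iterate_succ_apply]

theorem pv_iterate_parity (n : Nat) (a : List Int) :
    (fun b => b.map pvFlip)^[n] a = if n % 2 = 0 then a else a.map pvFlip := by
  induction n with
  | zero => simp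
  | succ k ih =>
    rw [Function.iterate_succ_apply', ih]
    rcases Nat.even_or_odd k with hk | hk
    · have h0 : k % 2 = 0 := Nat.even_iff.mp hk
      simp [h0, Nat.succ_mod_two_eq_one_iff.mpr h0]
    · have h1 : k % 2 = 1 := Nat.odd_iff.mp hk
      rw [if_neg (by omega), if_pos (Nat.succ_mod_two_eq_zero_iff.mpr h1)]
      exact pv_map_map a

-- ===== VERDICT (by name: the statement is the Claim_ definition above) =====
theorem oddeventransform_spec : Claim_equal_oddeventransform := by
  intro arr t _
  unfold Spec_oddeventransform oddeventransform oddeventransform_alt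
  have hbody : (fun (a : List Int) (_ : Int) =>
      (PySem.List.pyRange 0 (PySem.List.len a) 1).foldl (fun a i =>
        if PySem.Int.mod (PySem.List.pyGetD a i 0) 2 = 0 then
          PySem.List.pySetD a i (PySem.List.pyGetD a i 0 - 3)
        else
          PySem.List.pySetD a i (PySem.List.pyGetD a i 0 + 3)) a)
      = fun (a : List Int) (_ : Int) => a.map pvFlip := by
    funext a i
    have := pv_inner a
    unfold pvUpd at this
    exact this
  rw [hbody]
  by_cases ht : 0 < t
  · have houter : (PySem.List.pyRange 0 t 1).foldl (fun a _ => a.map pvFlip) arr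
        = (fun b => b.map pvFlip)^[t.toNat] arr := by
      have h := pv_outer t.toNat 0 arr
      rw [show ((0 : Int) + (t.toNat : Int)) = t by omega] at h
      exact h
    rw [houter, pv_iterate_parity]
    rw [show PySem.Int.mod t 2 = t % 2 from
      PySem.Int.mod_eq_emod_of_pos (by norm_num)]
    by_cases hp : t.toNat % 2 = 0
    · have hn : ¬ (t > 0 ∧ t % 2 = 1) := by rintro ⟨-, h1⟩; omega
      rw [if_pos hp, if_neg hn]
    · have hy : t > 0 ∧ t % 2 = 1 := by constructor <;> omega
      rw [if_neg hp, if_pos hy]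
  · have : PySem.List.pyRange 0 t 1 = [] := PySem.List.pyRange_one_eq_nil (by omega)
    rw [this]
    have hnot : ¬ (t > 0 ∧ PySem.Int.mod t 2 = 1) := by rintro ⟨h, -⟩; omega
    rw [if_neg hnot]
    simp
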